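-- pv_equiv track=rewrite | github.com/jhuliangr/RenMP3 | utils/functions.py | get_rid_of_track_numbers
-- ===== SOURCE A (Python) =====
-- def get_rid_of_track_numbers(song, temp, cond):
--     if song[0]>='0' and song[0]<='9':
--         for j in song:
--             if ((j>='0' and j<='9') or j == ' ' or j == '-' or j == '.') and cond:
--                 continue
--             else:
--                 cond = False
--                 temp+=j
--         return False, temp
--     else:
--         return cond, temp
-- ===== SOURCE B (Python) =====
-- def get_rid_of_track_numbers(song, temp, cond):
--     if '0' <= song[0] <= '9':
--         return False, temp + (song.lstrip("0123456789 -.") if cond else song)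
--     return cond, temp
-- ===== Notes on version B (the rewrite author's own statement) =====
-- stated objective: idiomatic
-- what changed: Replaces the character-by-character loop with a running cond flag by a single lstrip of the leading digit/space/dash/dot run (or a plain concatenation when cond is falsy).
import Mathlib
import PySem

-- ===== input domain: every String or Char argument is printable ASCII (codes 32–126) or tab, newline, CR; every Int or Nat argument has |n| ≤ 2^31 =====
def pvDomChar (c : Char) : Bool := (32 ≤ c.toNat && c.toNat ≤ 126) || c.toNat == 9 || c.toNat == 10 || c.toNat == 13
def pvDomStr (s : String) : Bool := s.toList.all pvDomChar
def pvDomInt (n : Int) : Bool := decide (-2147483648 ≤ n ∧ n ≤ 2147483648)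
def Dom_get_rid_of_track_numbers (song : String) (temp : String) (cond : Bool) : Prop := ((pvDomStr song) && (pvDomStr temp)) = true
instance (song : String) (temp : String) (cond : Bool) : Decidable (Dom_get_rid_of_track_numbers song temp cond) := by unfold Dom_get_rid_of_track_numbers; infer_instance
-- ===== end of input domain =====

-- B replaces A's char-by-char loop (with its running cond flag) by one lstrip of the
-- leading digit/space/dash/dot run; same return values, idiomatic rather than faster.

-- ===== PORT A =====
-- the loop body: skip strippable chars while cond holds, else clear cond and append
def grtStepA (st : Bool × String) (j : Char) : Bool × String :=
  if ((decide ('0' ≤ j ∧ j ≤ '9') || j == ' ' || j == '-' || j == '.') && st.1) = true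
  then st
  else (false, st.2.push j)

def get_rid_of_track_numbers (song : String) (temp : String) (cond : Bool) : Bool × String :=
  match PySem.Str.pyGet? song 0 with
  | some c =>
      if decide ('0' ≤ c ∧ c ≤ '9') then
        let r := song.toList.foldl grtStepA (cond, temp)
        (false, r.2)
      else (cond, temp)
  | none => (cond, temp)   -- song = "": Python raises IndexError, outside Pre_

-- ===== PORT B =====
-- song.lstrip("0123456789 -.") ported by hand as dropWhile over the char set — exact
def grtStrip (c : Char) : Bool := ("0123456789 -.".toList).contains c

def get_rid_of_track_numbers_alt (song : String) (temp : String) (cond : Bool) : Bool × String :=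
  match PySem.Str.pyGet? song 0 with
  | some c =>
      if decide ('0' ≤ c ∧ c ≤ '9') then
        (false, temp ++ (if cond then String.ofList (song.toList.dropWhile grtStrip) else song))
      else (cond, temp)
  | none => (cond, temp)   -- song = "": Python raises IndexError, outside Pre_

-- ===== PRECONDITION & SPEC =====
-- A evaluates song[0]: it raises IndexError exactly on the empty song
def Pre_get_rid_of_track_numbers (song : String) (temp : String) (cond : Bool) : Prop := song ≠ ""
instance (song : String) (temp : String) (cond : Bool) : Decidable (Pre_get_rid_of_track_numbers song temp cond) := by unfold Pre_get_rid_of_track_numbers; infer_instance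

def pvWitness_get_rid_of_track_numbers : String × String × Bool := ("01 - Song.mp3", "x", true)

def Spec_get_rid_of_track_numbers (song : String) (temp : String) (cond : Bool) (out : Bool × String) : Prop := out = get_rid_of_track_numbers_alt song temp cond
instance (song : String) (temp : String) (cond : Bool) (out : Bool × String) : Decidable (Spec_get_rid_of_track_numbers song temp cond out) := by unfold Spec_get_rid_of_track_numbers; infer_instance

-- ===== CLAIM (what is proved, stated in full; the proofs are below) =====
def Claim_equal_get_rid_of_track_numbers : Prop := ∀ (song : String) (temp : String) (cond : Bool), Dom_get_rid_of_track_numbers song temp cond → Pre_get_rid_of_track_numbers song temp cond → Spec_get_rid_of_track_numbers song temp cond (get_rid_of_track_numbers song temp cond)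

-- ===== LEMMAS AND PROOFS =====

def grtP (j : Char) : Bool := decide ('0' ≤ j ∧ j ≤ '9') || j == ' ' || j == '-' || j == '.'

lemma grtStrip_eq : grtStrip = grtP := by
  funext j
  have h : "0123456789 -.".toList = ['0','1','2','3','4','5','6','7','8','9',' ','-','.'] := by decide
  show (("0123456789 -.".toList).contains j) = _
  rw [h]; simp [grtP]
  rw [Bool.eq_iff_iff]
  simp only [Bool.or_eq_true, Bool.and_eq_true, decide_eq_true_eq, beq_iff_eq,
    Char.le_def, Char.ext_iff, UInt32.le_iff_toNat_le, UInt32.ext_iff]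
  have v0 : ('0':Char).val.toNat = 48 := by decide
  have v1 : ('1':Char).val.toNat = 49 := by decide
  have v2 : ('2':Char).val.toNat = 50 := by decide
  have v3 : ('3':Char).val.toNat = 51 := by decide
  have v4 : ('4':Char).val.toNat = 52 := by decide
  have v5 : ('5':Char).val.toNat = 53 := by decide
  have v6 : ('6':Char).val.toNat = 54 := by decide
  have v7 : ('7':Char).val.toNat = 55 := by decide
  have v8 : ('8':Char).val.toNat = 56 := by decide
  have v9 : ('9':Char).val.toNat = 57 := by decide
  have vs : (' ':Char).val.toNat = 32 := by decide
  have vd : ('-':Char).val.toNat = 45 := by decide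
  have vp : ('.':Char).val.toNat = 46 := by decide
  rw [v0, v1, v2, v3, v4, v5, v6, v7, v8, v9, vs, vd, vp]
  omega

lemma push_append (temp : String) (c : Char) (l : List Char) :
    temp.push c ++ String.ofList l = temp ++ String.ofList (c :: l) := by
  apply String.ext; simp

lemma grtStepA_eq (st : Bool × String) (j : Char) :
    grtStepA st j = if (grtP j && st.1) = true then st else (false, st.2.push j) := rfl

lemma loop_false (l : List Char) (temp : String) :
    l.foldl grtStepA (false, temp) = (false, temp ++ String.ofList l) := by
  induction l generalizing temp with
  | nil => simp
  | cons c l ih =>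
      rw [List.foldl_cons, grtStepA_eq]
      simp only [Bool.and_false]
      simp only [if_neg (by simp : ¬ (false = true))]
      rw [ih, push_append]

lemma loop_true (l : List Char) (temp : String) :
    (l.foldl grtStepA (true, temp)).2 = temp ++ String.ofList (l.dropWhile grtP) := by
  induction l generalizing temp with
  | nil => simp
  | cons c l ih =>
      rw [List.foldl_cons, grtStepA_eq]
      by_cases hc : grtP c = true
      · rw [if_pos (by simp [hc]), List.dropWhile_cons_of_pos hc]
        exact ih temp
      · rw [if_neg (by simp [hc]), List.dropWhile_cons_of_neg hc, loop_false, push_append]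

-- ===== VERDICT (by name: the statement is the Claim_ definition above) =====
theorem get_rid_of_track_numbers_spec : Claim_equal_get_rid_of_track_numbers := by
  intro song temp cond _ hpre
  show get_rid_of_track_numbers song temp cond = get_rid_of_track_numbers_alt song temp cond
  unfold get_rid_of_track_numbers get_rid_of_track_numbers_alt
  cases hget : PySem.Str.pyGet? song 0 with
  | none => rfl
  | some c =>
      simp only []
      by_cases hd : ('0' ≤ c ∧ c ≤ '9')
      · rw [if_pos (by simpa using hd), if_pos (by simpa using hd)]
        cases cond with
        | false =>
            rw [loop_false]
            simp only [if_neg (by simp : ¬ (false = true))]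
            congr 1
            apply String.ext; simp
        | true =>
            rw [grtStrip_eq]
            exact congrArg (Prod.mk false) (loop_true song.toList temp)
      · rw [if_neg (by simpa using hd), if_neg (by simpa using hd)]
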